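-- pv_equiv track=rewrite | github.com/Camig0/Proto--2 | helper.py | unrank_permutation
-- ===== SOURCE A (Python) =====
-- import math
--
-- def unrank_permutation(index, elements):
--     elems = elements.copy()
--     n = len(elems)
--     perm = []
--     for i in range(n - 1, -1, -1):
--         f = math.factorial(i)
--         pos = index // f
--         index %= f
--         perm.append(elems.pop(pos))
--     return perm
-- ===== SOURCE B (Python) =====
-- import math
--
-- def unrank_permutation(index, elements):
--     # Order-statistic tree: select-and-remove the pos-th remaining element in
--     # O(log n) instead of list.pop's O(n).
--     n = len(elements)
--     if n == 0:
--         return []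
--     index %= math.factorial(n)
--
--     # leaf = the element itself; node = [alive count of left subtree, left, right]
--     def build(xs):
--         if len(xs) == 1:
--             return xs[0]
--         m = len(xs) // 2
--         return [m, build(xs[:m]), build(xs[m:])]
--
--     def pick(t, k):
--         if not isinstance(t, list):
--             return t, None          # a leaf: remove it
--         c, l, r = t
--         if k < c:
--             x, l2 = pick(l, k)
--             return x, [c - 1, l2, r]
--         x, r2 = pick(r, k - c)
--         return x, [c, l, r2]
--
--     tree = build(elements)
--     perm = []
--     f = math.factorial(n)
--     for i in range(n - 1, -1, -1):
--         f //= i + 1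
--         pos, index = divmod(index, f)
--         x, tree = pick(tree, pos)
--         perm.append(x)
--     return perm
-- ===== Notes on version B (the rewrite author's own statement) =====
-- stated objective: faster
-- what changed: B replaces A's list.pop inner scan by an order-statistic binary tree (select-and-remove the pos-th remaining element in O(log n)), computes the factorials incrementally by one division per step instead of calling math.factorial each iteration, and normalises the index with one modulo n! up front.
-- crash fix: When elements is nonempty and index is outside [-n!, n!) A raises IndexError (pop position out of range); B, which reduces index modulo n! first, returns the permutation of rank index mod n!. — e.g. on unrank_permutation(2, [5, 7]): A raises IndexError, B returns [5, 7]
import Mathlib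
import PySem

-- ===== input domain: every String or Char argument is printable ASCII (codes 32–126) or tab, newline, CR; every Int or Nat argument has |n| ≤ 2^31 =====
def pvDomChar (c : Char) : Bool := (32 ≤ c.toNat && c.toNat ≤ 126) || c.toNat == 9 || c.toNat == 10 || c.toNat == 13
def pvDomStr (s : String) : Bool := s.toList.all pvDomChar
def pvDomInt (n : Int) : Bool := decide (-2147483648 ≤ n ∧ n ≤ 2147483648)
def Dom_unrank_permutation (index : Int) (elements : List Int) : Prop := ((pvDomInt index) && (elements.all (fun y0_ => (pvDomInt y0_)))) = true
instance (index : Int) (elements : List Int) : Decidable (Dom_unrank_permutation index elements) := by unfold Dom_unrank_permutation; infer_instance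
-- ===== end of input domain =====

-- B unranks via an order-statistic tree (O(n log n) select-and-remove) instead of A's
-- O(n^2) list.pop loop; equivalence of the RETURN values is what is proved (A copies its
-- list argument, neither version mutates the caller's list).

-- ===== PORT A =====
-- loop 'for i in range(n-1,-1,-1)' as recursion on the remaining iteration count (= i+1)
def unrankA_go : Nat → Int → List Int → List Int → List Int
  | 0, _, _, perm => perm
  | i + 1, index, elems, perm =>
      let f : Int := (Nat.factorial i : Int)
      let pos := PySem.Int.floordiv index f
      let index' := PySem.Int.mod index f
      match PySem.List.pop? elems pos with
      | none => perm                       -- Python raises IndexError here; excluded by Pre_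
      | some (x, elems') => unrankA_go i index' elems' (perm ++ [x])

def unrank_permutation (index : Int) (elements : List Int) : List Int :=
  unrankA_go elements.length index elements []

-- ===== PORT B =====
-- leaf = element; node carries the alive count of its left subtree; 'null' is Python's None
inductive OSTree where
  | null : OSTree
  | leaf : Int → OSTree
  | node : Int → OSTree → OSTree → OSTree
deriving DecidableEq, Repr

def buildT : List Int → OSTree
  | [] => .null                             -- unreachable: build is only called on nonempty lists
  | [x] => .leaf x
  | x :: y :: rest =>
      let m := (x :: y :: rest).length / 2
      OSTree.node (m : Int) (buildT ((x :: y :: rest).take m)) (buildT ((x :: y :: rest).drop m))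
termination_by xs => xs.length
decreasing_by
  all_goals simp [List.length_take, List.length_drop]
  all_goals omega

def pickT : OSTree → Int → Int × OSTree
  | .null, _ => (0, .null)                  -- unreachable (Python's pick never reaches None)
  | .leaf x, _ => (x, .null)
  | .node c l r, k =>
      if k < c then
        let p := pickT l k
        (p.1, OSTree.node (c - 1) p.2 r)
      else
        let p := pickT r (k - c)
        (p.1, OSTree.node c l p.2)

def unrankB_go : Nat → Int → Int → OSTree → List Int → List Int
  | 0, _, _, _, perm => perm
  | i + 1, f, index, t, perm =>
      let f' := PySem.Int.floordiv f ((i : Int) + 1)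
      let pos := PySem.Int.floordiv index f'
      let index' := PySem.Int.mod index f'
      let p := pickT t pos
      unrankB_go i f' index' p.2 (perm ++ [p.1])

def unrank_permutation_alt (index : Int) (elements : List Int) : List Int :=
  match elements with
  | [] => []
  | _ :: _ =>
      let nf : Int := (Nat.factorial elements.length : Int)
      unrankB_go elements.length nf (PySem.Int.mod index nf) (buildT elements) []

-- ===== PRECONDITION & SPEC =====
-- Pre_ excludes exactly the inputs where A raises IndexError: a nonempty list with
-- index outside [-n!, n!) makes A's first pop position fall outside the list.
def Pre_unrank_permutation (index : Int) (elements : List Int) : Prop :=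
  elements = [] ∨
    (-(Nat.factorial elements.length : Int) ≤ index ∧ index < (Nat.factorial elements.length : Int))
instance (index : Int) (elements : List Int) : Decidable (Pre_unrank_permutation index elements) := by
  unfold Pre_unrank_permutation; infer_instance

def pvWitness_unrank_permutation : Int × List Int := (2, [10, 20, 30])

-- When elements is nonempty and index is outside [-n!, n!) A raises IndexError; B,
-- which reduces index modulo n! first, returns the permutation of rank index mod n!.
def Raises_unrank_permutation (index : Int) (elements : List Int) : Prop :=
  elements ≠ [] ∧
    (index < -(Nat.factorial elements.length : Int) ∨ (Nat.factorial elements.length : Int) ≤ index)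
instance (index : Int) (elements : List Int) : Decidable (Raises_unrank_permutation index elements) := by
  unfold Raises_unrank_permutation; infer_instance

def pvRaiseWitness_unrank_permutation : Int × List Int := (2, [5, 7])
def pvRaiseWitnessOut_unrank_permutation : List Int := [5, 7]

def Spec_unrank_permutation (index : Int) (elements : List Int) (out : List Int) : Prop := out = unrank_permutation_alt index elements
instance (index : Int) (elements : List Int) (out : List Int) : Decidable (Spec_unrank_permutation index elements out) := by unfold Spec_unrank_permutation; infer_instance

-- ===== CLAIM (what is proved, stated in full; the proofs are below) =====
def Claim_equal_unrank_permutation : Prop := ∀ (index : Int) (elements : List Int), Dom_unrank_permutation index elements → Pre_unrank_permutation index elements → Spec_unrank_permutation index elements (unrank_permutation index elements)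

-- crash-fix claim (situation (2)): proved below as unrank_permutation_raises
def Claim_raises_unrank_permutation : Prop := (∀ (index : Int) (elements : List Int), Dom_unrank_permutation index elements → Raises_unrank_permutation index elements → ¬ Pre_unrank_permutation index elements) ∧ (Dom_unrank_permutation (pvRaiseWitness_unrank_permutation.1) (pvRaiseWitness_unrank_permutation.2) ∧ Raises_unrank_permutation (pvRaiseWitness_unrank_permutation.1) (pvRaiseWitness_unrank_permutation.2) ∧ unrank_permutation_alt (pvRaiseWitness_unrank_permutation.1) (pvRaiseWitness_unrank_permutation.2) = pvRaiseWitnessOut_unrank_permutation)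

-- ===== LEMMAS AND PROOFS =====

-- the remaining (alive) elements of a tree, in original order
def remT : OSTree → List Int
  | .null => []
  | .leaf x => [x]
  | .node _ l r => remT l ++ remT r

-- well-formed: every node's count equals the number of alive elements of its left subtree
inductive WFT : OSTree → Prop
  | null : WFT .null
  | leaf (x : Int) : WFT (.leaf x)
  | node (l r : OSTree) (hl : WFT l) (hr : WFT r) : WFT (.node ((remT l).length : Int) l r)

theorem buildT_rem (xs : List Int) : remT (buildT xs) = xs ∧ WFT (buildT xs) := by
  fun_induction buildT with
  | case1 => exact ⟨rfl, WFT.null⟩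
  | case2 x => exact ⟨rfl, WFT.leaf x⟩
  | case3 x y rest m ih1 ih2 =>
      refine ⟨by simp [remT, ih1.1, ih2.1], ?_⟩
      have hlen : ((remT (buildT (List.take m (x :: y :: rest)))).length : Int) = (m : Int) := by
        have hm : m ≤ (x :: y :: rest).length := Nat.div_le_self _ _
        rw [ih1.1, List.length_take, Nat.min_eq_left hm]
      have h := WFT.node _ _ ih1.2 ih2.2
      rw [hlen] at h
      exact h

theorem pickT_spec (t : OSTree) (hw : WFT t) (k : Nat) (hk : k < (remT t).length) :
    (pickT t (k : Int)).1 = (remT t)[k] ∧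
    remT (pickT t (k : Int)).2 = (remT t).eraseIdx k ∧
    WFT (pickT t (k : Int)).2 := by
  induction t generalizing k with
  | null => simp [remT] at hk
  | leaf x =>
      simp [remT] at hk
      subst hk
      simp [pickT, remT, WFT.null]
  | node c l r ihl ihr =>
      cases hw with
      | node l r hl hr =>
        by_cases hkl : k < (remT l).length
        · have hc : (k : Int) < ((remT l).length : Int) := by exact_mod_cast hkl
          have ih := ihl hl k hkl
          refine ⟨?_, ?_, ?_⟩
          · simp only [pickT, if_pos hc, remT]
            rw [ih.1, List.getElem_append_left hkl]
          · simp only [pickT, if_pos hc, remT]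
            rw [ih.2.1, List.eraseIdx_append_of_lt_length hkl]
          · simp only [pickT, if_pos hc]
            have hlen : ((remT l).length : Int) - 1 = ((remT (pickT l (k : Int)).2).length : Int) := by
              rw [ih.2.1, List.length_eraseIdx, if_pos hkl]
              omega
            have h := WFT.node _ r ih.2.2 hr
            rw [← hlen] at h
            exact h
        · have hc : ¬ (k : Int) < ((remT l).length : Int) := by
            intro h; exact hkl (by exact_mod_cast h)
          have hk' : k - (remT l).length < (remT r).length := by
            simp [remT] at hk; omega
          have hcast : (k : Int) - ((remT l).length : Int) = ((k - (remT l).length : Nat) : Int) := by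
            omega
          have ih := ihr hr (k - (remT l).length) hk'
          refine ⟨?_, ?_, ?_⟩
          · simp only [pickT, if_neg hc, remT]
            rw [hcast, ih.1, List.getElem_append_right (by omega)]
          · simp only [pickT, if_neg hc, remT]
            rw [hcast, ih.2.1, List.eraseIdx_append_of_length_le (by omega)]
          · simp only [pickT, if_neg hc, hcast]
            exact WFT.node _ _ hl ih.2.2

theorem go_eq (k : Nat) : ∀ (index : Int) (elems : List Int) (t : OSTree) (perm : List Int),
    WFT t → remT t = elems → elems.length = k →
    0 ≤ index → index < (Nat.factorial k : Int) →
    unrankA_go k index elems perm = unrankB_go k (Nat.factorial k : Int) index t perm := by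
  induction k with
  | zero => intro index elems t perm _ _ _ _ _; simp [unrankA_go, unrankB_go]
  | succ k ih =>
    intro index elems t perm hw hrem hlen h0 hlt
    subst hrem
    have hb : (0 : Int) < (Nat.factorial k : Int) := by exact_mod_cast Nat.factorial_pos k
    have hfs : ((Nat.factorial (k + 1) : Nat) : Int) = ((k : Int) + 1) * (Nat.factorial k : Int) := by
      rw [Nat.factorial_succ]; push_cast; ring
    have hf' : PySem.Int.floordiv ((Nat.factorial (k + 1) : Nat) : Int) ((k : Int) + 1)
        = (Nat.factorial k : Int) := by
      rw [hfs, PySem.Int.floordiv_eq_ediv_of_pos (by omega : (0:Int) < (k:Int)+1),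
        Int.mul_ediv_cancel_left _ (by omega)]
    have hpos0 : 0 ≤ PySem.Int.floordiv index (Nat.factorial k : Int) := by
      rw [PySem.Int.floordiv_eq_ediv_of_pos hb]
      exact Int.ediv_nonneg h0 hb.le
    have hposlt : PySem.Int.floordiv index (Nat.factorial k : Int) < (k : Int) + 1 := by
      rw [PySem.Int.floordiv_lt_iff_lt_mul hb, ← hfs]; exact hlt
    set j : Nat := (PySem.Int.floordiv index (Nat.factorial k : Int)).toNat with hjdef
    have hj : (j : Int) = PySem.Int.floordiv index (Nat.factorial k : Int) := by
      rw [hjdef]; omega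
    have hjlt : j < (remT t).length := by rw [hlen]; omega
    have hpick := pickT_spec t hw j hjlt
    have hpop := PySem.List.pop?_natCast (remT t) j hjlt
    have hm0 : 0 ≤ PySem.Int.mod index (Nat.factorial k : Int) := PySem.Int.mod_nonneg index hb
    have hmlt : PySem.Int.mod index (Nat.factorial k : Int) < (Nat.factorial k : Int) :=
      PySem.Int.mod_lt index hb
    calc unrankA_go (k + 1) index (remT t) perm
        = unrankA_go k (PySem.Int.mod index (Nat.factorial k : Int)) ((remT t).eraseIdx j)
            (perm ++ [(remT t)[j]]) := by
          simp only [unrankA_go, ← hj, hpop]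
      _ = unrankB_go k (Nat.factorial k : Int) (PySem.Int.mod index (Nat.factorial k : Int))
            (pickT t (j : Int)).2 (perm ++ [(remT t)[j]]) := by
          refine ih _ _ _ _ hpick.2.2 hpick.2.1 ?_ hm0 hmlt
          rw [List.length_eraseIdx, if_pos hjlt, hlen]; omega
      _ = unrankB_go (k + 1) (Nat.factorial (k + 1) : Int) index t perm := by
          simp only [unrankB_go, hf', ← hj, hpick.1]

-- Python's pop with a negative in-range position wraps around
theorem pop?_neg (xs : List Int) (i : Int) (h1 : -(xs.length : Int) ≤ i) (h2 : i < 0) :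
    PySem.List.pop? xs i = PySem.List.pop? xs (i + (xs.length : Int)) := by
  have hidx : PySem.List.pyIdx? xs.length i = PySem.List.pyIdx? xs.length (i + (xs.length : Int)) := by
    simp only [PySem.List.pyIdx?]
    rw [if_neg (by omega), if_pos h1, if_pos (by omega), if_pos (by omega)]
    congr 1; omega
  simp [PySem.List.pop?, hidx]

-- ===== VERDICT (by name: the statement is the Claim_ definition above) =====
theorem unrank_permutation_spec : Claim_equal_unrank_permutation := by
  intro index elements _hdom hpre
  unfold Spec_unrank_permutation
  cases elements with
  | nil => simp [unrank_permutation, unrank_permutation_alt, unrankA_go]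
  | cons a as =>
    rcases hpre with h | ⟨h1, h2⟩
    · exact absurd h (by simp)
    set m := as.length with hm
    have hlenxs : (a :: as).length = m + 1 := by simp [hm]
    rw [hlenxs] at h1 h2
    have hb : (0 : Int) < (Nat.factorial m : Int) := by exact_mod_cast Nat.factorial_pos m
    have hN : (0 : Int) < (Nat.factorial (m + 1) : Int) := by exact_mod_cast Nat.factorial_pos _
    have hfs : ((Nat.factorial (m + 1) : Nat) : Int) = ((m : Int) + 1) * (Nat.factorial m : Int) := by
      rw [Nat.factorial_succ]; push_cast; ring
    have hbuild := buildT_rem (a :: as)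
    show unrankA_go (a :: as).length index (a :: as) [] = unrank_permutation_alt index (a :: as)
    have halt : unrank_permutation_alt index (a :: as)
        = unrankB_go (a :: as).length ((Nat.factorial (a :: as).length : Nat) : Int)
            (PySem.Int.mod index ((Nat.factorial (a :: as).length : Nat) : Int)) (buildT (a :: as)) [] := rfl
    rw [halt, hlenxs]
    by_cases hi : 0 ≤ index
    · have hmod : PySem.Int.mod index (Nat.factorial (m + 1) : Int) = index := by
        rw [PySem.Int.mod_eq_emod_of_pos hN, Int.emod_eq_of_lt hi h2]
      rw [hmod]
      exact go_eq (m + 1) index (a :: as) (buildT (a :: as)) [] hbuild.2 hbuild.1 hlenxs hi h2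
    · -- index < 0 : A's first pop position is negative and wraps; B reduces index mod (m+1)! first
      have hneg : index < 0 := by omega
      have hpostop : PySem.Int.floordiv index (Nat.factorial m : Int) < 0 := by
        rw [PySem.Int.floordiv_lt_iff_lt_mul hb]; omega
      have hposbot : -((m : Int) + 1) ≤ PySem.Int.floordiv index (Nat.factorial m : Int) := by
        rw [PySem.Int.le_floordiv_iff_mul_le hb]; nlinarith [hfs, h1]
      set j : Nat := (PySem.Int.floordiv index (Nat.factorial m : Int) + ((m : Int) + 1)).toNat with hjdef
      have hj : (j : Int) = PySem.Int.floordiv index (Nat.factorial m : Int) + ((m : Int) + 1) := by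
        rw [hjdef]; omega
      have hjlt : j < (a :: as).length := by rw [hlenxs]; omega
      have hpop : PySem.List.pop? (a :: as) (PySem.Int.floordiv index (Nat.factorial m : Int))
          = some ((a :: as)[j], (a :: as).eraseIdx j) := by
        rw [pop?_neg _ _ (by rw [hlenxs]; omega) hpostop, hlenxs,
          show PySem.Int.floordiv index (Nat.factorial m : Int) + ((m + 1 : Nat) : Int) = (j : Int) by
            rw [hj]; push_cast; ring]
        exact PySem.List.pop?_natCast _ j hjlt
      have hmodN : PySem.Int.mod index (Nat.factorial (m + 1) : Int)
          = index + (Nat.factorial (m + 1) : Int) := by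
        rw [PySem.Int.mod_eq_emod_of_pos hN]
        conv_lhs => rw [show index = (index + (Nat.factorial (m + 1) : Int))
          + (Nat.factorial (m + 1) : Int) * (-1) by ring]
        rw [Int.add_mul_emod_self_left, Int.emod_eq_of_lt (by omega) (by omega)]
      have hf' : PySem.Int.floordiv ((Nat.factorial (m + 1) : Nat) : Int) ((m : Int) + 1)
          = (Nat.factorial m : Int) := by
        rw [hfs, PySem.Int.floordiv_eq_ediv_of_pos (by omega : (0:Int) < (m:Int)+1),
          Int.mul_ediv_cancel_left _ (by omega)]
      have hposB : PySem.Int.floordiv (index + (Nat.factorial (m + 1) : Int)) (Nat.factorial m : Int)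
          = (j : Int) := by
        rw [PySem.Int.floordiv_eq_ediv_of_pos hb, hfs, Int.add_mul_ediv_right _ _ (by omega), hj,
          PySem.Int.floordiv_eq_ediv_of_pos hb]
      have hmodB : PySem.Int.mod (index + (Nat.factorial (m + 1) : Int)) (Nat.factorial m : Int)
          = PySem.Int.mod index (Nat.factorial m : Int) := by
        rw [PySem.Int.mod_eq_emod_of_pos hb, PySem.Int.mod_eq_emod_of_pos hb, hfs,
          show index + ((m : Int) + 1) * (Nat.factorial m : Int)
            = index + (Nat.factorial m : Int) * ((m : Int) + 1) by ring,
          Int.add_mul_emod_self_left]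
      have hjlt' : j < (remT (buildT (a :: as))).length := by rw [hbuild.1]; exact hjlt
      have hpick := pickT_spec (buildT (a :: as)) hbuild.2 j hjlt'
      have hm0 : 0 ≤ PySem.Int.mod index (Nat.factorial m : Int) := PySem.Int.mod_nonneg index hb
      have hmlt : PySem.Int.mod index (Nat.factorial m : Int) < (Nat.factorial m : Int) :=
        PySem.Int.mod_lt index hb
      calc unrankA_go (m + 1) index (a :: as) []
          = unrankA_go m (PySem.Int.mod index (Nat.factorial m : Int)) ((a :: as).eraseIdx j)
              ([] ++ [(a :: as)[j]]) := by
            simp only [unrankA_go, hpop]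
        _ = unrankB_go m (Nat.factorial m : Int) (PySem.Int.mod index (Nat.factorial m : Int))
              (pickT (buildT (a :: as)) (j : Int)).2 ([] ++ [(a :: as)[j]]) := by
            refine go_eq m _ _ _ _ hpick.2.2 ?_ ?_ hm0 hmlt
            · rw [hpick.2.1, hbuild.1]
            · rw [List.length_eraseIdx, if_pos hjlt, hlenxs]; omega
        _ = unrankB_go (m + 1) ((Nat.factorial (m + 1) : Nat) : Int)
              (PySem.Int.mod index ((Nat.factorial (m + 1) : Nat) : Int)) (buildT (a :: as)) [] := by
            rw [hmodN]
            simp only [unrankB_go, hf', hposB, hmodB, hpick.1, hbuild.1]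

theorem unrank_permutation_raises : Claim_raises_unrank_permutation := by
  unfold Claim_raises_unrank_permutation
  constructor
  · intro index elements _ hr hp
    rcases hr with ⟨hne, hout⟩
    rcases hp with h | ⟨h1, h2⟩
    · exact hne h
    · omega
  · refine ⟨by decide, by decide, ?_⟩

    simp [unrank_permutation_alt, unrankB_go, buildT, pickT, pvRaiseWitness_unrank_permutation,
      pvRaiseWitnessOut_unrank_permutation, PySem.Int.floordiv, PySem.Int.mod]

-- self-check: the stated raise witness indeed lies outside Pre_ (a consequence of unrank_permutation_raises)
theorem raise_witness_outside_pre_ok :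
    ¬ Pre_unrank_permutation pvRaiseWitness_unrank_permutation.1 pvRaiseWitness_unrank_permutation.2 :=
  unrank_permutation_raises.1 _ _ (by decide) (by decide)
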